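-- pv_equiv track=rewrite | github.com/HeyHeyHayHay/Hacking-Challenge | superTopSecretEncryption.py | encryptionAction
-- ===== SOURCE A (Python) =====
-- def getCharCodes(plainText) :
--   charCodes = []
--
--   i = 0
--   while i < len(plainText):
--       charCodes.append(ord(plainText[i]))
--       i += 1
--
--
--
--   return charCodes
--
-- def encryptionAction(array, key) :
--   keyString = str(key)
--   keyNumbers = getCharCodes(keyString)
--   keyLength = len(keyNumbers)
--   encryptedArray = []
--
--   i = 0
--   while i < len(array):
--
--       j = 0
--       while j < keyLength:
--
--           if i%keyLength==j :
--
--               newEntry = ( (array[i] + (10*keyNumbers[j])) % 95 )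
--               encryptedArray.append(newEntry)
--           j += 1
--       i += 1
--
--
--   return encryptedArray
-- ===== SOURCE B (Python) =====
-- def encryptionAction(array, key):
--     codes = [ord(c) for c in str(key)]
--     L = len(codes)
--     return [(x + 10 * codes[i % L]) % 95 for i, x in enumerate(array)]
-- ===== Notes on version B (the rewrite author's own statement) =====
-- stated objective: faster
-- what changed: Replaced the O(keyLength) inner scan that finds j == i % keyLength with a direct codes[i % L] lookup inside a single enumerate-based list comprehension.
import Mathlib
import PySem

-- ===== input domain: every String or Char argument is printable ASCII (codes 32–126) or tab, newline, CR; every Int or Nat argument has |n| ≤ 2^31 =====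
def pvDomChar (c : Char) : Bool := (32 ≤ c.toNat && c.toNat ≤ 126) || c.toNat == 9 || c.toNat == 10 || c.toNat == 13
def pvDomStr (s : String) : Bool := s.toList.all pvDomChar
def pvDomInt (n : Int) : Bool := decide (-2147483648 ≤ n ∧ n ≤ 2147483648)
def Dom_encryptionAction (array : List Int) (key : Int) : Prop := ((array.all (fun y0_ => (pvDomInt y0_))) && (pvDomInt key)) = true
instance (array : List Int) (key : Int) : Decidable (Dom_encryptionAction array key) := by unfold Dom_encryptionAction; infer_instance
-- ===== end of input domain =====

-- B replaces A's O(keyLength) inner scan (find j with i % keyLength == j) by a direct codes[i % L] lookup: O(n) instead of O(n*keyLength).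

-- ===== PORT A =====
-- while loop over the string's indices, appending ord(plainText[i])
def getCharCodes (plainText : List Char) : List Int :=
  (PySem.List.pyRange 0 plainText.length 1).foldl
    (fun acc i => acc ++ [((PySem.List.pyGetD plainText i ' ').toNat : Int)]) []

def encryptionAction (array : List Int) (key : Int) : List Int :=
  let keyNumbers := getCharCodes (PySem.Int.toChars key)
  let keyLength : Int := keyNumbers.length
  (PySem.List.pyRange 0 array.length 1).foldl
    (fun acc i =>
      (PySem.List.pyRange 0 keyLength 1).foldl
        (fun acc2 j =>
          if PySem.Int.mod i keyLength == j then
            acc2 ++ [PySem.Int.mod (PySem.List.pyGetD array i 0 + 10 * PySem.List.pyGetD keyNumbers j 0) 95]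
          else acc2) acc) []

-- ===== PORT B =====
def encryptionAction_alt (array : List Int) (key : Int) : List Int :=
  let codes := (PySem.Int.toChars key).map (fun c => (c.toNat : Int))
  let L : Int := codes.length
  (PySem.List.enumerate array 0).map
    (fun p => PySem.Int.mod (p.2 + 10 * PySem.List.pyGetD codes (PySem.Int.mod p.1 L) 0) 95)

-- ===== PRECONDITION & SPEC =====
def Spec_encryptionAction (array : List Int) (key : Int) (out : List Int) : Prop := out = encryptionAction_alt array key
instance (array : List Int) (key : Int) (out : List Int) : Decidable (Spec_encryptionAction array key out) := by unfold Spec_encryptionAction; infer_instance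

-- ===== CLAIM (what is proved, stated in full; the proofs are below) =====
def Claim_equal_encryptionAction : Prop := ∀ (array : List Int) (key : Int), Dom_encryptionAction array key → Spec_encryptionAction array key (encryptionAction array key)

-- ===== LEMMAS AND PROOFS =====

-- getCharCodes is the character-code list
lemma getCharCodes_eq (cs : List Char) :
    getCharCodes cs = cs.map (fun c => (c.toNat : Int)) := by
  unfold getCharCodes
  rw [PySem.List.foldl_append_singleton_eq_map]
  have : (PySem.List.pyRange 0 cs.length 1).map (fun i => ((PySem.List.pyGetD cs i ' ').toNat : Int))
      = ((PySem.List.pyRange 0 cs.length 1).map (fun i => PySem.List.pyGetD cs i ' ')).map (fun c => (c.toNat : Int)) := by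
    simp [List.map_map, Function.comp]
  rw [List.nil_append, this, show ((cs.length : Int)) = PySem.List.len cs from (PySem.List.len_eq cs).symm,
    PySem.List.map_pyGetD_pyRange_zero]

-- the inner while loop appends exactly one entry: the one at j = m, for a <= m < b
lemma filter_pyRange_eq_singleton (a b m : Int) (h1 : a ≤ m) (h2 : m < b) :
    (PySem.List.pyRange a b 1).filter (fun j => m == j) = [m] := by
  rw [PySem.List.pyRange_one_append a m b h1 (le_of_lt h2), List.filter_append,
      PySem.List.pyRange_one_cons h2]
  have h3 : (PySem.List.pyRange a m 1).filter (fun j => m == j) = [] := by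
    rw [List.filter_eq_nil_iff]
    intro x hx
    rw [PySem.List.mem_pyRange_one] at hx
    simp only [beq_iff_eq]
    omega
  have h4 : (PySem.List.pyRange (m + 1) b 1).filter (fun j => m == j) = [] := by
    rw [List.filter_eq_nil_iff]
    intro x hx
    rw [PySem.List.mem_pyRange_one] at hx
    simp only [beq_iff_eq]
    omega
  simp [h3, h4]

-- B's map over enumerate, written as a map over List.range
lemma enumerate_map_eq_range_map (g : Int × Int → Int) (xs : List Int) :
    ∀ (s : Nat), (PySem.List.enumerate xs (s : Int)).map g
      = (List.range xs.length).map (fun k => g (((s + k : Nat) : Int), xs.getD k 0)) := by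
  induction xs with
  | nil => intro s; simp [PySem.List.enumerate]
  | cons x xs ih =>
    intro s
    rw [PySem.List.enumerate_cons, List.map_cons]
    have hcast : ((s : Int) + 1) = (((s + 1 : Nat)) : Int) := by push_cast; ring
    rw [hcast, ih (s + 1)]
    rw [List.length_cons, List.range_succ_eq_map, List.map_cons, List.map_map]
    refine congrArg₂ _ (by norm_num) ?_
    refine List.map_congr_left ?_
    intro k _
    simp only [Function.comp, List.getD_cons_succ]
    congr 2
    push_cast
    ring

theorem encryptionAction_spec : Claim_equal_encryptionAction := by
  intro array key _
  unfold Spec_encryptionAction encryptionAction encryptionAction_alt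
  simp only []
  rw [getCharCodes_eq]
  set codes := (PySem.Int.toChars key).map (fun c => (c.toNat : Int)) with hcodes
  have hL : 0 < (codes.length : Int) := by
    have h0 : 0 < (PySem.Int.toChars key).length := by
      unfold PySem.Int.toChars
      split <;> simp [Nat.length_toDigits_pos]
    simp [hcodes]
    omega
  set L : Int := (codes.length : Int) with hLdef
  set e : Int → Int := fun i =>
    PySem.Int.mod (PySem.List.pyGetD array i 0 + 10 * PySem.List.pyGetD codes (PySem.Int.mod i L) 0) 95 with he
  have hinner : ∀ (acc : List Int) (i : Int),
      (PySem.List.pyRange 0 L 1).foldl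
        (fun acc2 j =>
          if PySem.Int.mod i L == j then
            acc2 ++ [PySem.Int.mod (PySem.List.pyGetD array i 0 + 10 * PySem.List.pyGetD codes j 0) 95]
          else acc2) acc = acc ++ [e i] := by
    intro acc i
    rw [PySem.List.foldl_append_if
        (p := fun j => PySem.Int.mod i L == j)
        (f := fun j => PySem.Int.mod (PySem.List.pyGetD array i 0 + 10 * PySem.List.pyGetD codes j 0) 95)]
    rw [filter_pyRange_eq_singleton 0 L (PySem.Int.mod i L) (PySem.Int.mod_nonneg i hL) (PySem.Int.mod_lt i hL)]
    simp [he]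
  have houter : (PySem.List.pyRange 0 (array.length : Int) 1).foldl
      (fun acc i =>
        (PySem.List.pyRange 0 L 1).foldl
          (fun acc2 j =>
            if PySem.Int.mod i L == j then
              acc2 ++ [PySem.Int.mod (PySem.List.pyGetD array i 0 + 10 * PySem.List.pyGetD codes j 0) 95]
            else acc2) acc) [] = (PySem.List.pyRange 0 (array.length : Int) 1).map e := by
    have step1 : (PySem.List.pyRange 0 (array.length : Int) 1).foldl
        (fun acc i =>
          (PySem.List.pyRange 0 L 1).foldl
            (fun acc2 j =>
              if PySem.Int.mod i L == j then
                acc2 ++ [PySem.Int.mod (PySem.List.pyGetD array i 0 + 10 * PySem.List.pyGetD codes j 0) 95]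
              else acc2) acc) []
        = (PySem.List.pyRange 0 (array.length : Int) 1).foldl (fun acc i => acc ++ [e i]) [] :=
      PySem.List.foldl_congr_mem _ _ _ _ (fun acc i _ => hinner acc i)
    rw [step1, PySem.List.foldl_append_singleton_eq_map, List.nil_append]
  rw [houter, PySem.List.pyRange_zero_natCast, List.map_map]
  have henum := enumerate_map_eq_range_map
    (fun p => PySem.Int.mod (p.2 + 10 * PySem.List.pyGetD codes (PySem.Int.mod p.1 L) 0) 95) array 0
  rw [Nat.cast_zero] at henum
  rw [henum]
  refine List.map_congr_left ?_
  intro k hk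
  rw [List.mem_range] at hk
  simp [he, PySem.List.pyGetD_natCast]
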